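-- pv_equiv track=rewrite | github.com/SuguruChhaya/python-tutorials | GUI/test.py | bedmas_recognizer
-- ===== SOURCE A (Python) =====
-- def bedmas_recognizer(string):
--     multiply = []
--     divide = []
--     add = []
--     subtract = []
--     for char in range(0, len(string)):
--         if string[char] == "*":
--             multiply.append(char)
--         elif string[char] == "/":
--             divide.append(char)
--         elif string[char] == "+":
--             add.append(char)
--         elif string[char] == "-":
--             subtract.append(char)
--     return [multiply,divide,add,subtract]
-- ===== SOURCE B (Python) =====
-- def bedmas_recognizer(string):
--     multiply = [i for i, c in enumerate(string) if c == "*"]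
--     divide = [i for i, c in enumerate(string) if c == "/"]
--     add = [i for i, c in enumerate(string) if c == "+"]
--     subtract = [i for i, c in enumerate(string) if c == "-"]
--     return [multiply, divide, add, subtract]
-- ===== Notes on version B (the rewrite author's own statement) =====
-- stated objective: idiomatic
-- what changed: Replaces the single index-driven if/elif loop with four accumulators by four independent enumerate-based list comprehensions, one per operator, each scanning the string separately.
import Mathlib
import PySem

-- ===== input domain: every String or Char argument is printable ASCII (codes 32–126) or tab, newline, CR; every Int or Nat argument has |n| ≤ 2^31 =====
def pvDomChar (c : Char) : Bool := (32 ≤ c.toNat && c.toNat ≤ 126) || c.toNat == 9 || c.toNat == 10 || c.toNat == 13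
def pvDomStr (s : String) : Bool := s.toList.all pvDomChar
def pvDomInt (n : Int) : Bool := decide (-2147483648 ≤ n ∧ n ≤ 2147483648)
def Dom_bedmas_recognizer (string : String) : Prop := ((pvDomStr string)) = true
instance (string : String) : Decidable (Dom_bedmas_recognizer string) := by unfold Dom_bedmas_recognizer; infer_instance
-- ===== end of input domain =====

-- B replaces A's single index-driven if/elif loop with four independent per-operator
-- enumerate comprehensions (objective: idiomatic); same return value on every input.

-- ===== PORT A =====
-- one pass over range(0, len(string)), branching on string[char], four accumulators
def bedmas_recognizer (string : String) : List (List Int) :=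
  let st :=
    (PySem.List.pyRange 0 (PySem.Str.len string) 1).foldl
      (fun (acc : List Int × List Int × List Int × List Int) (char : Int) =>
        let (multiply, divide, add, subtract) := acc
        if PySem.Str.pyGet? string char = some '*' then
          (multiply ++ [char], divide, add, subtract)
        else if PySem.Str.pyGet? string char = some '/' then
          (multiply, divide ++ [char], add, subtract)
        else if PySem.Str.pyGet? string char = some '+' then
          (multiply, divide, add ++ [char], subtract)
        else if PySem.Str.pyGet? string char = some '-' then
          (multiply, divide, add, subtract ++ [char])
        else acc)
      ([], [], [], [])
  [st.1, st.2.1, st.2.2.1, st.2.2.2]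

-- ===== PORT B =====
-- [i for i, c in enumerate(string) if c == op]
def pvOpIndices (string : String) (op : Char) : List Int :=
  (PySem.List.enumerate string.toList 0).filterMap
    (fun p => if p.2 = op then some p.1 else none)

def bedmas_recognizer_alt (string : String) : List (List Int) :=
  [pvOpIndices string '*', pvOpIndices string '/', pvOpIndices string '+', pvOpIndices string '-']

-- ===== PRECONDITION & SPEC =====
def Spec_bedmas_recognizer (string : String) (out : List (List Int)) : Prop := out = bedmas_recognizer_alt string
instance (string : String) (out : List (List Int)) : Decidable (Spec_bedmas_recognizer string out) := by unfold Spec_bedmas_recognizer; infer_instance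

-- ===== CLAIM (what is proved, stated in full; the proofs are below) =====
def Claim_equal_bedmas_recognizer : Prop := ∀ (string : String), Dom_bedmas_recognizer string → Spec_bedmas_recognizer string (bedmas_recognizer string)

-- ===== LEMMAS AND PROOFS =====

-- A's loop body rephrased on (index, character) pairs
def pvStepE (acc : List Int × List Int × List Int × List Int) (p : Int × Char) :
    List Int × List Int × List Int × List Int :=
  let (multiply, divide, add, subtract) := acc
  if p.2 = '*' then (multiply ++ [p.1], divide, add, subtract)
  else if p.2 = '/' then (multiply, divide ++ [p.1], add, subtract)
  else if p.2 = '+' then (multiply, divide, add ++ [p.1], subtract)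
  else if p.2 = '-' then (multiply, divide, add, subtract ++ [p.1])
  else acc

def pvSel (l : List Char) (i : Int) (op : Char) : List Int :=
  (PySem.List.enumerate l i).filterMap (fun p => if p.2 = op then some p.1 else none)

theorem pvSel_nil (i : Int) (op : Char) : pvSel [] i op = [] := rfl

theorem pvSel_cons (c : Char) (l : List Char) (i : Int) (op : Char) :
    pvSel (c :: l) i op = (if c = op then [i] else []) ++ pvSel l (i + 1) op := by
  simp [pvSel, PySem.List.enumerate_cons, List.filterMap_cons]
  split_ifs <;> simp

theorem pvLoopE (l : List Char) (i : Int) (m d a s : List Int) :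
    (PySem.List.enumerate l i).foldl pvStepE (m, d, a, s) =
      (m ++ pvSel l i '*', d ++ pvSel l i '/', a ++ pvSel l i '+', s ++ pvSel l i '-') := by
  induction l generalizing i m d a s with
  | nil => simp [pvSel_nil, PySem.List.enumerate_nil]
  | cons c l ih =>
    rw [PySem.List.enumerate_cons]
    simp only [List.foldl_cons, ih, pvSel_cons]
    by_cases h1 : c = '*' <;> by_cases h2 : c = '/' <;> by_cases h3 : c = '+' <;>
      by_cases h4 : c = '-' <;> simp_all [pvStepE]

theorem bedmas_recognizer_eq_alt (string : String) :
    bedmas_recognizer string = bedmas_recognizer_alt string := by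
  unfold bedmas_recognizer bedmas_recognizer_alt
  have hrange :
      (PySem.List.pyRange 0 (PySem.Str.len string) 1).foldl
        (fun (acc : List Int × List Int × List Int × List Int) (char : Int) =>
          let (multiply, divide, add, subtract) := acc
          if PySem.Str.pyGet? string char = some '*' then
            (multiply ++ [char], divide, add, subtract)
          else if PySem.Str.pyGet? string char = some '/' then
            (multiply, divide ++ [char], add, subtract)
          else if PySem.Str.pyGet? string char = some '+' then
            (multiply, divide, add ++ [char], subtract)
          else if PySem.Str.pyGet? string char = some '-' then
            (multiply, divide, add, subtract ++ [char])
          else acc)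
        ([], [], [], []) =
      (PySem.List.enumerate string.toList 0).foldl pvStepE ([], [], [], []) := by
    rw [PySem.List.enumerate_eq_map_pyRange string.toList ' ', List.foldl_map]
    rw [PySem.Str.len_eq]
    apply PySem.List.foldl_congr_mem
    intro acc j hj
    rw [PySem.List.mem_pyRange_one] at hj
    obtain ⟨k, rfl⟩ : ∃ k : Nat, j = (k : Int) := ⟨j.toNat, (Int.toNat_of_nonneg hj.1).symm⟩
    have hlt' : k < string.toList.length := by exact_mod_cast (by simpa using hj.2)
    have hgd : PySem.List.pyGetD string.toList (k : Int) ' ' = string.toList[k] := by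
      simpa using PySem.List.pyGetD_eq_getElem string.toList ' ' hj.1 (by simpa using hj.2)
    simp [pvStepE, hgd, List.getElem?_eq_getElem hlt']
  rw [hrange, pvLoopE]
  simp [pvOpIndices, pvSel]

-- ===== VERDICT (by name: the statement is the Claim_ definition above) =====
theorem bedmas_recognizer_spec : Claim_equal_bedmas_recognizer := by
  intro string _
  unfold Spec_bedmas_recognizer
  exact bedmas_recognizer_eq_alt string
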